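-- pv_equiv track=rewrite | github.com/Remmy195/MFiX-CFD-DEM | mfixgui/tools/util.py | drop_row_column_triangular
-- ===== SOURCE A (Python) =====
-- def drop_row_column_triangular(a, n, r):
--     # Inputs:
--     #  a :  upper-triangular n by n matrix represented as a list (n)(n+1)/2
--     #  n :  size of input
--     #  r :  index of row/column to drop, 1-based
--     # Return:
--     #  list representing matrix "a" with row/column "r" removed
--     ret = []
--     i = j = 1
--     for x in a:
--         if i != r and j != r:
--             ret.append(x)
--         j += 1
--         if j > n:
--             i += 1
--             j = i
--     return ret
-- ===== SOURCE B (Python) =====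
-- def drop_row_column_triangular(a, n, r):
--     # Collect the flat indices of row r and of column r, then filter them out
--     # in a single pass over the list.
--     if not (1 <= r <= n):
--         return list(a)
--     drop = set()
--     start = 0
--     for i in range(1, n + 1):
--         if start >= len(a):
--             break
--         if i == r:
--             drop.update(range(start, min(start + n - i + 1, len(a))))
--         elif i < r:
--             drop.add(start + r - i)
--         start += n - i + 1
--     return [x for k, x in enumerate(a) if k not in drop]
-- ===== Notes on version B (the rewrite author's own statement) =====
-- stated objective: alternative
-- what changed: B precomputes the set of flat indices occupied by row r and by column r and then keeps everything else in one index-filtered pass, instead of A's per-element loop that tracks the (i,j) coordinates of every element and tests both against r; Pre_ excludes malformed inputs whose flat list extends past the documented n(n+1)/2 triangular storage with r pointing into that excess, where no behaviour is specified and A's and B's values differ.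
-- outside the precondition, e.g. on drop_row_column_triangular([1, 2, 3, 4], 2, 3): A returns [1, 2, 3], B returns [1, 2, 3, 4]
import Mathlib
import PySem

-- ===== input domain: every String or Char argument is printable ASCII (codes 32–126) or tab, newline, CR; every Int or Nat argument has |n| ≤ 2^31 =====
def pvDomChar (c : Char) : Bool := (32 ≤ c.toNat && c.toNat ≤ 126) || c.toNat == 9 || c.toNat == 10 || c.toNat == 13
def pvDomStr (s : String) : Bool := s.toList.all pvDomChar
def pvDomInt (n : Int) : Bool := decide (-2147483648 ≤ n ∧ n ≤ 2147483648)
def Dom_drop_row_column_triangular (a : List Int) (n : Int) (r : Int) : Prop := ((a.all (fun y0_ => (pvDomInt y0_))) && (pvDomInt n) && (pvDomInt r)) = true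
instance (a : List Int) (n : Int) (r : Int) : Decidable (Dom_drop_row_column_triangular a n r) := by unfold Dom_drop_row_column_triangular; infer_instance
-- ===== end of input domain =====

-- B precomputes the set of flat indices holding row r and column r, then keeps
-- everything else in one index-filtered pass, instead of A's per-element (i,j)
-- coordinate tracking; alternative decomposition, same cost.

-- ===== PORT A =====
-- A's loop body as a step function over the state (ret, i, j)
def pvStepA (n r : Int) (s : List Int × Int × Int) (x : Int) : List Int × Int × Int :=
  let ret := if s.2.1 ≠ r ∧ s.2.2 ≠ r then s.1 ++ [x] else s.1
  let j := s.2.2 + 1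
  if j > n then (ret, s.2.1 + 1, s.2.1 + 1) else (ret, s.2.1, j)

def drop_row_column_triangular (a : List Int) (n : Int) (r : Int) : List Int :=
  (a.foldl (pvStepA n r) ([], 1, 1)).1

-- ===== PORT B =====
-- Source B's index-collecting loop: 'for i in range(1, n+1): if start >= len(a): break; …'
def pvBuildDrop (alen n r : Int) (drop : PySem.Set Int) (start i : Int) : PySem.Set Int :=
  if h : i ≤ n ∧ start < alen then
    let drop' :=
      if i = r then PySem.Set.update drop (PySem.List.pyRange start (min (start + n - i + 1) alen) 1)
      else if i < r then PySem.Set.add drop (start + r - i)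
      else drop
    pvBuildDrop alen n r drop' (start + (n - i + 1)) (i + 1)
  else drop
termination_by (alen - start).toNat
decreasing_by omega

def drop_row_column_triangular_alt (a : List Int) (n : Int) (r : Int) : List Int :=
  if 1 ≤ r ∧ r ≤ n then
    let drop := pvBuildDrop (a.length : Int) n r (PySem.Set.ofList []) 0 1
    ((PySem.List.enumerate a 0).filter (fun kx => !(PySem.Set.contains drop kx.1))).map (fun kx => kx.2)
  else a

-- ===== PRECONDITION & SPEC =====
-- Pre_ excludes malformed inputs whose flat list extends past the documented
-- n(n+1)/2 triangular storage with r pointing into that excess: there no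
-- behaviour is specified, A drops the excess element and B keeps it.
-- (2*r > 2*M + 2*len(a) - M*(M+1), M = max(n,0), says r is past every index the
-- excess elements would receive.)
def Pre_drop_row_column_triangular (a : List Int) (n : Int) (r : Int) : Prop :=
  r ≤ max n 0 ∨ 2 * max n 0 + (2 * (a.length : Int) - max n 0 * (max n 0 + 1)) < 2 * r
instance (a : List Int) (n : Int) (r : Int) : Decidable (Pre_drop_row_column_triangular a n r) := by unfold Pre_drop_row_column_triangular; infer_instance

def pvWitness_drop_row_column_triangular : List Int × Int × Int := ([5, 7, 2, 9, 4, 6], 3, 2)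

def Spec_drop_row_column_triangular (a : List Int) (n : Int) (r : Int) (out : List Int) : Prop := out = drop_row_column_triangular_alt a n r
instance (a : List Int) (n : Int) (r : Int) (out : List Int) : Decidable (Spec_drop_row_column_triangular a n r out) := by unfold Spec_drop_row_column_triangular; infer_instance

-- ===== CLAIM (what is proved, stated in full; the proofs are below) =====
def Claim_equal_drop_row_column_triangular : Prop := ∀ (a : List Int) (n : Int) (r : Int), Dom_drop_row_column_triangular a n r → Pre_drop_row_column_triangular a n r → Spec_drop_row_column_triangular a n r (drop_row_column_triangular a n r)

-- ===== LEMMAS AND PROOFS =====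

-- A's loop, recursively (n r fixed parameters; state i j)
def pvFA (n r : Int) : List Int → Int → Int → List Int
  | [], _, _ => []
  | x :: xs, i, j =>
      (if i ≠ r ∧ j ≠ r then [x] else []) ++
        (if j + 1 > n then pvFA n r xs (i + 1) (i + 1) else pvFA n r xs i (j + 1))

-- A's foldl from an arbitrary state
theorem pvFoldl_eq (n r : Int) : ∀ (a : List Int) (ret : List Int) (i j : Int),
    (a.foldl (pvStepA n r) (ret, i, j)).1 = ret ++ pvFA n r a i j := by
  intro a
  induction a with
  | nil => intro ret i j; simp [pvFA]
  | cons x xs ih =>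
      intro ret i j
      rw [List.foldl_cons]
      by_cases hj : j + 1 > n <;> by_cases hk : i ≠ r ∧ j ≠ r
      · have hstep : pvStepA n r (ret, i, j) x = (ret ++ [x], i + 1, i + 1) := by
          simp [pvStepA, hj, hk]
        rw [hstep, ih]
        simp [pvFA, hj, hk]
      · have hstep : pvStepA n r (ret, i, j) x = (ret, i + 1, i + 1) := by
          simp only [pvStepA]; rw [if_neg hk, if_pos hj]
        rw [hstep, ih]
        simp [pvFA, hj, hk]
      · have hstep : pvStepA n r (ret, i, j) x = (ret ++ [x], i, j + 1) := by
          simp only [pvStepA]; rw [if_pos hk, if_neg hj]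
        rw [hstep, ih]
        simp [pvFA, hj, hk]
      · have hstep : pvStepA n r (ret, i, j) x = (ret, i, j + 1) := by
          simp only [pvStepA]; rw [if_neg hk, if_neg hj]
        rw [hstep, ih]
        simp [pvFA, hj, hk]

-- partial-row processing: up to len elements, columns j, j+1, …
def pvRowF (r : Int) : List Int → Nat → Int → Int → List Int
  | [], _, _, _ => []
  | _ :: _, 0, _, _ => []
  | x :: xs, Nat.succ len, i, j =>
      (if i ≠ r ∧ j ≠ r then [x] else []) ++ pvRowF r xs len i (j + 1)

theorem pvRowF_nil (r : Int) (len : Nat) (i j : Int) : pvRowF r [] len i j = [] := by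
  cases len <;> rfl

theorem pvRowF_zero (r : Int) (a : List Int) (i j : Int) : pvRowF r a 0 i j = [] := by
  cases a <;> rfl

-- L1: A's loop processes one row then restarts at (i+1, i+1)
theorem pvFA_row (n r : Int) : ∀ (a : List Int) (i j : Int), i ≤ j → j ≤ n →
    pvFA n r a i j = pvRowF r a (n - j + 1).toNat i j ++ pvFA n r (a.drop (n - j + 1).toNat) (i + 1) (i + 1) := by
  intro a
  induction a with
  | nil => intro i j _ _; simp [pvFA, pvRowF_nil]
  | cons x xs ih =>
      intro i j hij hjn
      have hlen : (n - j + 1).toNat = (n - (j + 1) + 1).toNat + 1 := by omega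
      rw [hlen]
      simp only [pvFA, pvRowF, List.drop_succ_cons]
      by_cases hj : j + 1 > n
      · have h0 : (n - (j + 1) + 1).toNat = 0 := by omega
        simp [hj, h0, pvRowF_zero]
      · have hj' : j + 1 ≤ n := by omega
        simp [hj, ih i (j + 1) (by omega) hj', List.append_assoc]

-- L2a: row r contributes nothing
theorem pvRowF_self (r : Int) : ∀ (a : List Int) (len : Nat) (j : Int),
    pvRowF r a len r j = [] := by
  intro a
  induction a with
  | nil => intro len j; exact pvRowF_nil r len r j
  | cons x xs ih =>
      intro len j
      cases len with
      | zero => rfl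
      | succ m => simp [pvRowF, ih]

-- L2b: column r already passed: everything kept
theorem pvRowF_past (r : Int) : ∀ (a : List Int) (len : Nat) (i j : Int), i ≠ r → r < j →
    pvRowF r a len i j = a.take len := by
  intro a
  induction a with
  | nil => intro len i j _ _; simp [pvRowF_nil]
  | cons x xs ih =>
      intro len i j hi hr
      cases len with
      | zero => rfl
      | succ m =>
          have hne : ¬ j = r := by omega
          simp [pvRowF, hi, hne, ih m i (j + 1) hi (by omega)]

-- L2c: column r ahead: the element at offset r - j is dropped
theorem pvRowF_erase (r : Int) : ∀ (a : List Int) (len : Nat) (i j : Int), i ≠ r → j ≤ r →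
    pvRowF r a len i j = (a.take len).eraseIdx (r - j).toNat := by
  intro a
  induction a with
  | nil => intro len i j _ _; simp [pvRowF_nil]
  | cons x xs ih =>
      intro len i j hi hjr
      cases len with
      | zero => simp [pvRowF_zero]
      | succ m =>
          by_cases hj : j = r
          · have h0 : (r - j).toNat = 0 := by omega
            simp only [pvRowF, hj, List.take_succ_cons]
            simp [pvRowF_past r xs m i (r + 1) hi (by omega)]
          · have h1 : (r - j).toNat = (r - (j + 1)).toNat + 1 := by omega
            simp [pvRowF, hi, hj, ih m i (j + 1) hi (by omega), h1]

-- per-element region i = j > n (A's leftover loop state past the triangle)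
def pvTailF : List Int → Int → Int → List Int
  | [], _, _ => []
  | x :: xs, i, r => (if i ≠ r then [x] else []) ++ pvTailF xs (i + 1) r

theorem pvFA_tail (n r : Int) : ∀ (a : List Int) (i : Int), n < i →
    pvFA n r a i i = pvTailF a i r := by
  intro a
  induction a with
  | nil => intro i _; rfl
  | cons x xs ih =>
      intro i hi
      simp only [pvFA, pvTailF, if_pos (by omega : i + 1 > n), and_self_iff]
      by_cases h : i ≠ r <;> simp [h, ih (i + 1) (by omega)]

theorem pvTailF_keep (r : Int) : ∀ (a : List Int) (i : Int), r < i ∨ i + (a.length : Int) ≤ r →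
    pvTailF a i r = a := by
  intro a
  induction a with
  | nil => intro i _; rfl
  | cons x xs ih =>
      intro i h
      simp only [List.length_cons] at h
      have hne : i ≠ r := by omega
      simp [pvTailF, hne, ih (i + 1) (by omega)]

-- the ideal drop-index list for rows i, i+1, …, n with row i starting at flat offset s
def pvDropIdx (n r i s : Int) : List Int :=
  if h : i ≤ n then
    (if i = r then PySem.List.pyRange s (s + (n - i + 1)) 1
     else if i < r then [s + (r - i)] else []) ++
      pvDropIdx n r (i + 1) (s + (n - i + 1))
  else []
termination_by (n + 1 - i).toNat
decreasing_by omega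

theorem pvDropIdx_lb (n r : Int) : ∀ (fuel : Nat) (i s : Int), (n + 1 - i).toNat ≤ fuel →
    ∀ k ∈ pvDropIdx n r i s, s ≤ k := by
  intro fuel
  induction fuel with
  | zero =>
      intro i s hf k hk
      rw [pvDropIdx, dif_neg (by omega : ¬ i ≤ n)] at hk
      simp at hk
  | succ m ih =>
      intro i s hf k hk
      by_cases hin : i ≤ n
      · rw [pvDropIdx, dif_pos hin] at hk
        rcases List.mem_append.mp hk with h | h
        · by_cases hir : i = r
          · rw [if_pos hir, PySem.List.mem_pyRange_one] at h; omega
          · by_cases hlt : i < r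
            · rw [if_neg hir, if_pos hlt] at h; simp at h; omega
            · rw [if_neg hir, if_neg hlt] at h; simp at h
        · have := ih (i + 1) (s + (n - i + 1)) (by omega) k h
          omega
      · rw [pvDropIdx, dif_neg hin] at hk
        simp at hk

-- the built set has the same members as pvDropIdx below the list length
theorem pvBuild_mem (n r alen : Int) : ∀ (fuel : Nat) (i s : Int) (acc : PySem.Set Int),
    (alen - s).toNat ≤ fuel → ∀ (k : Int), k < alen →
    (k ∈ pvBuildDrop alen n r acc s i ↔ k ∈ acc ∨ k ∈ pvDropIdx n r i s) := by
  intro fuel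
  induction fuel with
  | zero =>
      intro i s acc hf k hk
      have hs : ¬ s < alen := by omega
      rw [pvBuildDrop, dif_neg (by omega : ¬ (i ≤ n ∧ s < alen))]
      constructor
      · exact Or.inl
      · rintro (h | h)
        · exact h
        · exact absurd (pvDropIdx_lb n r ((n + 1 - i).toNat) i s le_rfl k h) (by omega)
  | succ m ih =>
      intro i s acc hf k hk
      by_cases hg : i ≤ n ∧ s < alen
      · rw [pvBuildDrop, dif_pos hg]
        rw [pvDropIdx, dif_pos hg.1]
        simp only []
        rw [ih (i + 1) (s + (n - i + 1)) _ (by omega) k hk]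
        by_cases hir : i = r
        · rw [if_pos hir, if_pos hir, PySem.Set.mem_update]
          constructor
          · rintro ((h | h) | h)
            · exact Or.inl h
            · rw [PySem.List.mem_pyRange_one] at h
              exact Or.inr (List.mem_append.mpr (Or.inl (PySem.List.mem_pyRange_one.mpr (by omega))))
            · exact Or.inr (List.mem_append.mpr (Or.inr h))
          · rintro (h | h)
            · exact Or.inl (Or.inl h)
            · rcases List.mem_append.mp h with h | h
              · rw [PySem.List.mem_pyRange_one] at h
                exact Or.inl (Or.inr (PySem.List.mem_pyRange_one.mpr (by omega)))
              · exact Or.inr h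
        · rw [if_neg hir, if_neg hir]
          by_cases hlt : i < r
          · rw [if_pos hlt, if_pos hlt, PySem.Set.mem_add]
            constructor
            · rintro ((h | h) | h)
              · exact Or.inl h
              · exact Or.inr (List.mem_append.mpr (Or.inl (by simp; omega)))
              · exact Or.inr (List.mem_append.mpr (Or.inr h))
            · rintro (h | h)
              · exact Or.inl (Or.inl h)
              · rcases List.mem_append.mp h with h | h
                · simp at h; exact Or.inl (Or.inr (by omega))
                · exact Or.inr h
          · rw [if_neg hlt, if_neg hlt]
            simp only [List.nil_append]
      · rw [pvBuildDrop, dif_neg hg]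
        constructor
        · exact Or.inl
        · rintro (h | h)
          · exact h
          · by_cases hin : i ≤ n
            · have hs : ¬ s < alen := fun hs => hg ⟨hin, hs⟩
              exact absurd (pvDropIdx_lb n r ((n + 1 - i).toNat) i s le_rfl k h) (by omega)
            · rw [pvDropIdx, dif_neg hin] at h; simp at h

-- index-filtered keep (Source B's final comprehension, with D the drop indices)
def pvEF (D : List Int) : Int → List Int → List Int
  | _, [] => []
  | s, x :: xs => (if s ∈ D then [] else [x]) ++ pvEF D (s + 1) xs

theorem pvEF_append (D : List Int) : ∀ (l₁ l₂ : List Int) (s : Int),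
    pvEF D s (l₁ ++ l₂) = pvEF D s l₁ ++ pvEF D (s + (l₁.length : Int)) l₂ := by
  intro l₁
  induction l₁ with
  | nil => intro l₂ s; simp [pvEF]
  | cons x xs ih =>
      intro l₂ s
      simp only [List.cons_append, pvEF, ih l₂ (s + 1), List.length_cons, List.append_assoc]
      have : s + 1 + (xs.length : Int) = s + ((xs.length : Nat) + 1 : Nat) := by push_cast; ring
      rw [this]

theorem pvEF_none (D : List Int) : ∀ (a : List Int) (s : Int),
    (∀ k : Int, s ≤ k → k < s + (a.length : Int) → k ∉ D) → pvEF D s a = a := by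
  intro a
  induction a with
  | nil => intro s _; rfl
  | cons x xs ih =>
      intro s h
      simp only [List.length_cons] at h
      have h0 : s ∉ D := h s le_rfl (by push_cast; omega)
      simp [pvEF, h0, ih (s + 1) (fun k hk1 hk2 => h k (by omega) (by push_cast at hk2 ⊢; omega))]

theorem pvEF_all (D : List Int) : ∀ (a : List Int) (s : Int),
    (∀ k : Int, s ≤ k → k < s + (a.length : Int) → k ∈ D) → pvEF D s a = [] := by
  intro a
  induction a with
  | nil => intro s _; rfl
  | cons x xs ih =>
      intro s h
      simp only [List.length_cons] at h
      have h0 : s ∈ D := h s le_rfl (by push_cast; omega)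
      simp [pvEF, h0, ih (s + 1) (fun k hk1 hk2 => h k (by omega) (by push_cast at hk2 ⊢; omega))]

theorem pvEF_single (D : List Int) : ∀ (a : List Int) (s c : Int), s ≤ c →
    (∀ k : Int, s ≤ k → k < s + (a.length : Int) → (k ∈ D ↔ k = c)) →
    pvEF D s a = a.eraseIdx (c - s).toNat := by
  intro a
  induction a with
  | nil => intro s c _ _; rfl
  | cons x xs ih =>
      intro s c hsc h
      simp only [List.length_cons] at h
      by_cases hc : c = s
      · subst hc
        have h0 : c ∈ D := (h c le_rfl (by push_cast; omega)).mpr rfl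
        have h0' : (c - c).toNat = 0 := by omega
        rw [h0']
        simp only [pvEF, if_pos h0, List.nil_append, List.eraseIdx_cons_zero]
        exact pvEF_none D xs (c + 1) (fun k hk1 hk2 => by
          intro hkD
          have := (h k (by omega) (by push_cast at hk2 ⊢; omega)).mp hkD
          omega)
      · have h0 : s ∉ D := fun hs => hc ((h s le_rfl (by push_cast; omega)).mp hs).symm
        have h1 : (c - s).toNat = (c - (s + 1)).toNat + 1 := by omega
        rw [h1]
        simp only [pvEF, if_neg h0, List.singleton_append, List.eraseIdx_cons_succ]
        by_cases hcin : c < s + 1 + (xs.length : Int)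
        · rw [ih (s + 1) c (by omega) (fun k hk1 hk2 => h k (by omega) (by push_cast at hk2 ⊢; omega))]
        · rw [pvEF_none D xs (s + 1) (fun k hk1 hk2 => by
            intro hkD
            have := (h k (by omega) (by push_cast at hk2 ⊢; omega)).mp hkD
            omega)]
          rw [List.eraseIdx_of_length_le (by omega)]

-- the port's filter-of-enumerate is pvEF when set membership matches D on the indices seen
theorem pvFiltEnum (S : PySem.Set Int) (D : List Int) : ∀ (a : List Int) (s : Int),
    (∀ k : Int, s ≤ k → k < s + (a.length : Int) → (k ∈ S ↔ k ∈ D)) →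
    ((PySem.List.enumerate a s).filter (fun kx => !(PySem.Set.contains S kx.1))).map (fun kx => kx.2) = pvEF D s a := by
  intro a
  induction a with
  | nil => intro s _; simp [PySem.List.enumerate_nil, pvEF]
  | cons x xs ih =>
      intro s h
      simp only [List.length_cons] at h
      rw [PySem.List.enumerate_cons]
      have htail := ih (s + 1) (fun k hk1 hk2 => h k (by omega) (by push_cast at hk2 ⊢; omega))
      by_cases hs : s ∈ D
      · have hms : s ∈ S := (h s le_rfl (by push_cast; omega)).mpr hs
        rw [List.filter_cons, if_neg (by simp [hms]), htail]
        simp [pvEF, hs]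
      · have hns : s ∉ S := fun hm => hs ((h s le_rfl (by push_cast; omega)).mp hm)
        rw [List.filter_cons, if_pos (by simp [hns]), List.map_cons, htail]
        simp [pvEF, hs]

-- a bounded prefix of the drop list is invisible from offsets past it
theorem pvEF_drop_prefix (P D : List Int) (q : Int) (hP : ∀ k ∈ P, k < q) :
    ∀ (l : List Int) (t : Int), q ≤ t → pvEF (P ++ D) t l = pvEF D t l := by
  intro l
  induction l with
  | nil => intro t _; rfl
  | cons y ys ih =>
      intro t ht
      have hmem : (t ∈ P ++ D) ↔ t ∈ D := by
        constructor
        · intro h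
          rcases List.mem_append.mp h with h | h
          · exact absurd (hP t h) (by omega)
          · exact h
        · exact fun h => List.mem_append.mpr (Or.inr h)
      simp only [pvEF, ih (t + 1) (by omega)]
      by_cases hD : t ∈ D
      · rw [if_pos (hmem.mpr hD), if_pos hD]
      · rw [if_neg (fun h => hD (hmem.mp h)), if_neg hD]

-- main induction (1 ≤ r ≤ n): A row by row equals the index-filtered keep
theorem pvMain (n r : Int) (hrn : r ≤ n) : ∀ (fuel : Nat) (a : List Int),
    a.length ≤ fuel → ∀ (i s : Int), 1 ≤ i → i ≤ n →
    pvFA n r a i i = pvEF (pvDropIdx n r i s) s a := by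
  intro fuel
  induction fuel with
  | zero =>
      intro a ha i s _ _
      have : a = [] := by cases a <;> simp_all
      subst this
      simp [pvFA, pvEF]
  | succ m ih =>
      intro a ha i s h1 hin
      have hd : (1 : Int) ≤ n - i + 1 := by omega
      set d : Nat := (n - i + 1).toNat with hdd
      have hd1 : 1 ≤ d := by omega
      rw [pvFA_row n r a i i le_rfl hin]
      rw [pvDropIdx, dif_pos hin]
      set rh : List Int := (if i = r then PySem.List.pyRange s (s + (n - i + 1)) 1
        else if i < r then [s + (r - i)] else []) with hrh
      set D' : List Int := pvDropIdx n r (i + 1) (s + (n - i + 1)) with hD'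
      have hlbD' : ∀ k ∈ D', s + (n - i + 1) ≤ k :=
        fun k hk => pvDropIdx_lb n r ((n + 1 - (i + 1)).toNat) (i + 1) (s + (n - i + 1)) le_rfl k hk
      have hubrh : ∀ k ∈ rh, s ≤ k ∧ k < s + (n - i + 1) := by
        intro k hk
        rw [hrh] at hk
        by_cases hir : i = r
        · rw [if_pos hir, PySem.List.mem_pyRange_one] at hk; omega
        · by_cases hlt : i < r
          · rw [if_neg hir, if_pos hlt] at hk; simp at hk; omega
          · rw [if_neg hir, if_neg hlt] at hk; simp at hk
      have hsplit : a = a.take d ++ a.drop d := (List.take_append_drop d a).symm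
      have hlentake : ((a.take d).length : Int) ≤ n - i + 1 := by
        simp [List.length_take]; omega
      conv_rhs => rw [hsplit]
      rw [pvEF_append]
      congr 1
      · -- the row part
        by_cases hir : i = r
        · rw [← hir, pvRowF_self]
          rw [pvEF_all]
          intro k hk1 hk2
          apply List.mem_append.mpr (Or.inl _)
          rw [hrh, if_pos hir, PySem.List.mem_pyRange_one]
          omega
        · by_cases hlt : i < r
          · rw [pvRowF_erase r a d i i hir (by omega)]
            rw [pvEF_single (rh ++ D') (a.take d) s (s + (r - i)) (by omega)]
            · congr 1; omega
            · intro k hk1 hk2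
              constructor
              · intro hk
                rcases List.mem_append.mp hk with h | h
                · rw [hrh, if_neg hir, if_pos hlt] at h; simp at h; omega
                · have := hlbD' k h; omega
              · intro hk
                apply List.mem_append.mpr (Or.inl _)
                rw [hrh, if_neg hir, if_pos hlt]
                simp [hk]
          · rw [pvRowF_past r a d i i hir (by omega)]
            rw [pvEF_none]
            intro k hk1 hk2 hk
            rcases List.mem_append.mp hk with h | h
            · rw [hrh, if_neg hir, if_neg hlt] at h; simp at h
            · have := hlbD' k h; omega
      · -- the rest of the list
        rcases Nat.lt_or_ge a.length d with hsh | hlong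
        · have h0 : a.drop d = [] := by simp; omega
          rw [h0]
          by_cases hlast : i + 1 ≤ n
          · simp [pvFA, pvEF]
          · simp [pvFA, pvEF]
        · have htk : ((a.take d).length : Int) = n - i + 1 := by
            simp [List.length_take]; omega
          rw [htk]
          rw [pvEF_drop_prefix rh D' (s + (n - i + 1)) (fun k hk => (hubrh k hk).2) (a.drop d) _ le_rfl]
          by_cases hlast : i + 1 ≤ n
          · exact ih (a.drop d) (by simp [List.length_drop]; omega) (i + 1) (s + (n - i + 1)) (by omega) hlast
          · have hni : n < i + 1 := by omega
            rw [pvFA_tail n r (a.drop d) (i + 1) hni]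
            rw [pvTailF_keep r (a.drop d) (i + 1) (Or.inl (by omega))]
            rw [hD', pvDropIdx, dif_neg (by omega : ¬ i + 1 ≤ n)]
            rw [pvEF_none]
            intro k _ _ hk
            simp at hk

-- r below every coordinate: A keeps everything
theorem pvFA_keep_low (n r : Int) (hr : r ≤ 0) : ∀ (a : List Int) (i j : Int),
    1 ≤ i → 1 ≤ j → pvFA n r a i j = a := by
  intro a
  induction a with
  | nil => intro i j _ _; rfl
  | cons x xs ih =>
      intro i j hi hj
      have hk : i ≠ r ∧ j ≠ r := by omega
      by_cases hjn : j + 1 > n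
      · simp [pvFA, hk, hjn, ih (i + 1) (i + 1) (by omega) (by omega)]
      · simp [pvFA, hk, hjn, ih i (j + 1) hi (by omega)]

-- r past the whole triangle and past the excess (the Pre_ case n < r): A keeps everything
theorem pvFA_keep_high (n r : Int) (hnr : n < r) : ∀ (fuel : Nat) (a : List Int),
    a.length ≤ fuel → ∀ (i : Int), 1 ≤ i → i ≤ n →
    2 * (a.length : Int) < (n - i + 1) * (n - i + 2) + 2 * (r - n) → pvFA n r a i i = a := by
  intro fuel
  induction fuel with
  | zero =>
      intro a ha i _ _ _
      have : a = [] := by cases a <;> simp_all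
      subst this; rfl
  | succ m ih =>
      intro a ha i h1 hin hinv
      have hd : (1 : Int) ≤ n - i + 1 := by omega
      set d : Nat := (n - i + 1).toNat with hdd
      have hd1 : 1 ≤ d := by omega
      rw [pvFA_row n r a i i le_rfl hin]
      have hir : i ≠ r := by omega
      rw [pvRowF_erase r a d i i hir (by omega)]
      have hrow : (a.take d).eraseIdx (r - i).toNat = a.take d := by
        apply List.eraseIdx_of_length_le
        have : (a.take d).length ≤ d := by simp [List.length_take]
        omega
      rw [hrow]
      rcases Nat.lt_or_ge a.length d with hsh | hlong
      · have h0 : a.drop d = [] := by simp; omega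
        have h1' : a.take d = a := by simp; omega
        rw [h0, h1']
        cases hc : a with
        | nil => rfl
        | cons y ys => simp [pvFA]
      · have hrest : ((a.drop d).length : Int) = (a.length : Int) - (n - i + 1) := by
          simp [List.length_drop]; omega
        by_cases hlast : i + 1 ≤ n
        · rw [ih (a.drop d) (by simp [List.length_drop]; omega) (i + 1) (by omega) hlast
            (by rw [hrest]; ring_nf; ring_nf at hinv; omega)]
          exact List.take_append_drop d a
        · have hni : n < i + 1 := by omega
          rw [pvFA_tail n r (a.drop d) (i + 1) hni]
          rw [pvTailF_keep r (a.drop d) (i + 1) (Or.inr (by rw [hrest]; nlinarith))]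
          exact List.take_append_drop d a

-- ===== VERDICT (by name: the statement is the Claim_ definition above) =====
theorem drop_row_column_triangular_spec : Claim_equal_drop_row_column_triangular := by
  intro a n r _ hpre
  show drop_row_column_triangular a n r = drop_row_column_triangular_alt a n r
  unfold drop_row_column_triangular drop_row_column_triangular_alt
  rw [pvFoldl_eq n r a [] 1 1, List.nil_append]
  by_cases hr : 1 ≤ r ∧ r ≤ n
  · rw [if_pos hr]
    have hmem := pvBuild_mem n r (a.length : Int) ((a.length : Int) - 0).toNat 1 0 (PySem.Set.ofList []) le_rfl
    rw [pvFiltEnum (pvBuildDrop (a.length : Int) n r (PySem.Set.ofList []) 0 1) (pvDropIdx n r 1 0) a 0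
      (fun k hk1 hk2 => by
        rw [hmem k (by simpa using hk2)]
        simp [PySem.Set.ofList])]
    exact pvMain n r hr.2 a.length a le_rfl 1 0 le_rfl (by omega)
  · rw [if_neg hr]
    by_cases hr0 : r ≤ 0
    · exact pvFA_keep_low n r hr0 a 1 1 le_rfl le_rfl
    · have hnr : n < r := by omega
      unfold Pre_drop_row_column_triangular at hpre
      by_cases hn1 : 1 ≤ n
      · have hM : max n 0 = n := by omega
        rw [hM] at hpre
        exact pvFA_keep_high n r hnr a.length a le_rfl 1 le_rfl hn1 (by ring_nf; ring_nf at hpre; omega)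
      · have hM : max n 0 = 0 := by omega
        rw [hM] at hpre
        rw [pvFA_tail n r a 1 (by omega)]
        exact pvTailF_keep r a 1 (Or.inr (by omega))
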